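-- pv_equiv track=rewrite | github.com/Bobcatsoap/jy-server | cell/RoomType6PassiveFindCards.py | find_san_dai_er
-- ===== SOURCE A (Python) =====
-- def find_san_dai_er(target_cards):
--     three = []
--     two = []
--     target_cards.sort()
--     for i in target_cards:
--         if target_cards.count(i) >= 3:
--             if i not in three:
--                 three.append(i)
--     for i in target_cards:
--         if target_cards.count(i) == 2:
--             if i not in two:
--                 two.append(i)
--     san_dai_er_s = []
--     for i in three:
--         for j in two:
--             san_dai_er = [i, i, i, j, j]
--             if san_dai_er not in san_dai_er_s:
--                 san_dai_er_s.append(san_dai_er)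
--     return san_dai_er_s
-- ===== SOURCE B (Python) =====
-- def find_san_dai_er(target_cards):
--     xs = sorted(target_cards)
--     threes = []
--     twos = []
--     i = 0
--     n = len(xs)
--     while i < n:
--         j = i
--         while j < n and xs[j] == xs[i]:
--             j += 1
--         run = j - i
--         if run >= 3:
--             threes.append(xs[i])
--         elif run == 2:
--             twos.append(xs[i])
--         i = j
--     return [[t, t, t, p, p] for t in threes for p in twos]
-- ===== Notes on version B (the rewrite author's own statement) =====
-- stated objective: faster
-- what changed: Instead of repeated list.count scans with membership-dedup lists, B sorts once and does a single run-length scan over the sorted list (two-pointer run detection), classifying each run of equal values as a triple candidate (run>=3) or pair candidate (run==2) in one pass, then emits the product.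
import Mathlib
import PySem

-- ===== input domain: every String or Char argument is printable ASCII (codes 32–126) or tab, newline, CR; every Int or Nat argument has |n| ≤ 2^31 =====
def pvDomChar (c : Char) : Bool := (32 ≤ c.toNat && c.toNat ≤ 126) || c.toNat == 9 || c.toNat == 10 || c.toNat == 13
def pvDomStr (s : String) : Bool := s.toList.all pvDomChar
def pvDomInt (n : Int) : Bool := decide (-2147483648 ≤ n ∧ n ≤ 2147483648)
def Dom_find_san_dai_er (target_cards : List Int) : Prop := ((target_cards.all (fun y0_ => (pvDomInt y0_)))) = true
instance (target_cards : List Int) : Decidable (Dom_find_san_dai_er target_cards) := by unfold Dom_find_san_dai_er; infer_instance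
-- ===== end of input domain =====

-- B sorts once and classifies runs of equal values in a single linear scan instead of A's repeated
-- count/membership scans; A also sorts its argument list IN PLACE, so the equivalence proved here
-- is about the return value only.

-- ===== PORT A =====
def find_san_dai_er (target_cards : List Int) : List (List Int) :=
  let tc := PySem.List.sorted target_cards (fun x => x) false
  let three := tc.foldl (fun acc i =>
      if 3 ≤ PySem.List.count tc i then (if i ∈ acc then acc else acc ++ [i]) else acc) []
  let two := tc.foldl (fun acc i =>
      if PySem.List.count tc i == 2 then (if i ∈ acc then acc else acc ++ [i]) else acc) []
  three.foldl (fun acc i => two.foldl (fun acc2 j =>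
      let s := [i, i, i, j, j]
      if s ∈ acc2 then acc2 else acc2 ++ [s]) acc) []

-- ===== PORT B =====
-- Source B's index-based while loop over the sorted list, transcribed as structural recursion:
-- each step consumes the leading run of equal values (j advancing while xs[j] == xs[i]
-- = takeWhile/dropWhile on the tail) and classifies it by its length.
def pvRunScan : List Int → List Int × List Int
  | [] => ([], [])
  | x :: rest =>
    let r := pvRunScan (rest.dropWhile (fun y => y == x))
    let run := (rest.takeWhile (fun y => y == x)).length + 1
    if 3 ≤ run then (x :: r.1, r.2)
    else if run = 2 then (r.1, x :: r.2)
    else r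
termination_by l => l.length
decreasing_by simpa using Nat.lt_succ_of_le (List.length_dropWhile_le _ _)

def find_san_dai_er_alt (target_cards : List Int) : List (List Int) :=
  let xs := PySem.List.sorted target_cards (fun x => x) false
  let tt := pvRunScan xs
  tt.1.flatMap (fun t => tt.2.map (fun p => [t, t, t, p, p]))

-- ===== PRECONDITION & SPEC =====
def Spec_find_san_dai_er (target_cards : List Int) (out : List (List Int)) : Prop := out = find_san_dai_er_alt target_cards
instance (target_cards : List Int) (out : List (List Int)) : Decidable (Spec_find_san_dai_er target_cards out) := by unfold Spec_find_san_dai_er; infer_instance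

-- ===== CLAIM (what is proved, stated in full; the proofs are below) =====
def Claim_equal_find_san_dai_er : Prop := ∀ (target_cards : List Int), Dom_find_san_dai_er target_cards → Spec_find_san_dai_er target_cards (find_san_dai_er target_cards)

-- ===== LEMMAS AND PROOFS =====

-- A's "append if condition holds and not yet present" loop, abstracted over its condition.
def ddLoop (p : Int → Prop) [DecidablePred p] (l acc : List Int) : List Int :=
  l.foldl (fun acc i => if p i then (if i ∈ acc then acc else acc ++ [i]) else acc) acc

theorem mem_ddLoop (p : Int → Prop) [DecidablePred p] :
    ∀ (l acc : List Int) (x : Int), x ∈ ddLoop p l acc ↔ x ∈ acc ∨ (x ∈ l ∧ p x) := by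
  intro l
  induction l with
  | nil => intro acc x; simp [ddLoop]
  | cons a l ih =>
    intro acc x
    simp only [ddLoop, List.foldl_cons] at ih ⊢
    by_cases hp : p a
    · rw [if_pos hp]
      by_cases hm : a ∈ acc
      · rw [if_pos hm, ih]
        simp only [List.mem_cons]
        constructor
        · rintro (h | ⟨h1, h2⟩)
          exacts [Or.inl h, Or.inr ⟨Or.inr h1, h2⟩]
        · rintro (h | ⟨rfl | h1, h2⟩)
          exacts [Or.inl h, Or.inl hm, Or.inr ⟨h1, h2⟩]
      · rw [if_neg hm, ih]
        simp only [List.mem_cons, List.mem_append, List.not_mem_nil, or_false]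
        constructor
        · rintro ((h | rfl) | ⟨h1, h2⟩)
          exacts [Or.inl h, Or.inr ⟨Or.inl rfl, hp⟩, Or.inr ⟨Or.inr h1, h2⟩]
        · rintro (h | ⟨rfl | h1, h2⟩)
          exacts [Or.inl (Or.inl h), Or.inl (Or.inr rfl), Or.inr ⟨h1, h2⟩]
    · rw [if_neg hp, ih]
      simp only [List.mem_cons]
      constructor
      · rintro (h | ⟨h1, h2⟩)
        exacts [Or.inl h, Or.inr ⟨Or.inr h1, h2⟩]
      · rintro (h | ⟨rfl | h1, h2⟩)
        exacts [Or.inl h, absurd h2 hp, Or.inr ⟨h1, h2⟩]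

theorem nodup_ddLoop (p : Int → Prop) [DecidablePred p] :
    ∀ (l acc : List Int), acc.Nodup → (ddLoop p l acc).Nodup := by
  intro l
  induction l with
  | nil => intro acc h; simpa [ddLoop] using h
  | cons a l ih =>
    intro acc h
    simp only [ddLoop, List.foldl_cons] at ih ⊢
    by_cases hp : p a
    · rw [if_pos hp]
      by_cases hm : a ∈ acc
      · rw [if_pos hm]; exact ih acc h
      · rw [if_neg hm]
        refine ih _ (List.Nodup.append h (List.nodup_singleton a) ?_)
        intro x hx hxa
        rw [List.mem_singleton] at hxa
        subst hxa
        exact hm hx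
    · rw [if_neg hp]; exact ih acc h

theorem pairwise_ddLoop (p : Int → Prop) [DecidablePred p] :
    ∀ (l acc : List Int), l.Pairwise (· ≤ ·) → acc.Pairwise (· ≤ ·) →
      (∀ x ∈ acc, ∀ y ∈ l, x ≤ y) → (ddLoop p l acc).Pairwise (· ≤ ·) := by
  intro l
  induction l with
  | nil => intro acc _ ha _; simpa [ddLoop] using ha
  | cons a l ih =>
    intro acc hl ha hcross
    rw [List.pairwise_cons] at hl
    simp only [ddLoop, List.foldl_cons] at ih ⊢
    by_cases hp : p a
    · by_cases hm : a ∈ acc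
      · rw [if_pos hp, if_pos hm]
        exact ih acc hl.2 ha (fun x hx y hy => hcross x hx y (List.mem_cons_of_mem _ hy))
      · rw [if_pos hp, if_neg hm]
        refine ih _ hl.2 ?_ ?_
        · refine List.pairwise_append.2 ⟨ha, by simp, ?_⟩
          intro u hu v hv
          rw [List.mem_singleton] at hv
          subst hv
          exact hcross u hu _ (by simp)
        · intro u hu v hv
          rcases List.mem_append.1 hu with h | h
          · exact hcross u h v (List.mem_cons_of_mem _ hv)
          · rw [List.mem_singleton] at h
            subst h
            exact hl.1 v hv
    · rw [if_neg hp]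
      exact ih acc hl.2 ha (fun x hx y hy => hcross x hx y (List.mem_cons_of_mem _ hy))

-- Characterisation of the run scan on a (weakly) sorted list: its first component holds exactly
-- the values of count ≥ 3, its second exactly those of count = 2, both sorted without duplicates.
theorem pvRunScan_spec :
    ∀ (l : List Int), l.Pairwise (· ≤ ·) →
      ((∀ v, v ∈ (pvRunScan l).1 ↔ v ∈ l ∧ 3 ≤ l.count v) ∧
       (∀ v, v ∈ (pvRunScan l).2 ↔ v ∈ l ∧ l.count v = 2) ∧
       (pvRunScan l).1.Pairwise (· ≤ ·) ∧ (pvRunScan l).2.Pairwise (· ≤ ·) ∧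
       (pvRunScan l).1.Nodup ∧ (pvRunScan l).2.Nodup) := by
  have key : ∀ (n : ℕ) (l : List Int), l.length ≤ n → l.Pairwise (· ≤ ·) →
      ((∀ v, v ∈ (pvRunScan l).1 ↔ v ∈ l ∧ 3 ≤ l.count v) ∧
           (∀ v, v ∈ (pvRunScan l).2 ↔ v ∈ l ∧ l.count v = 2) ∧
           (pvRunScan l).1.Pairwise (· ≤ ·) ∧ (pvRunScan l).2.Pairwise (· ≤ ·) ∧
           (pvRunScan l).1.Nodup ∧ (pvRunScan l).2.Nodup) := by
    intro n
    induction n with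
    | zero =>
      intro l hlen _
      have hnil : l = [] := List.eq_nil_of_length_eq_zero (Nat.le_zero.1 hlen)
      subst hnil; simp [pvRunScan]
    | succ n ihn =>
      intro l hlen hp
      cases l with
      | nil => simp [pvRunScan]
      | cons x rest =>
        rw [List.pairwise_cons] at hp
        obtain ⟨hx, hrest⟩ := hp
        have hsplit : rest.takeWhile (fun y => y == x) ++ rest.dropWhile (fun y => y == x) = rest :=
          List.takeWhile_append_dropWhile
        have hsame : ∀ y ∈ rest.takeWhile (fun y => y == x), y = x :=
          fun y hy => by simpa using List.mem_takeWhile_imp hy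
        have hsub : (rest.dropWhile (fun y => y == x)).Sublist rest := List.dropWhile_sublist _
        have hrest'p : (rest.dropWhile (fun y => y == x)).Pairwise (· ≤ ·) := hrest.sublist hsub
        have hxnot : x ∉ rest.dropWhile (fun y => y == x) := by
          intro hmem
          cases hr' : rest.dropWhile (fun y => y == x) with
          | nil => rw [hr'] at hmem; simp at hmem
          | cons h0 t =>
            have hph0 : (h0 == x) = false := by
              have := List.head_dropWhile_not (fun y => y == x) (l := rest) (by rw [hr']; simp)
              simpa [hr'] using this
            have hh0x : h0 ≠ x := by simpa using hph0
            rw [hr'] at hmem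
            rcases List.mem_cons.1 hmem with rfl | hmemt
            · exact hh0x rfl
            · have h1 : h0 ≤ x := by
                rw [hr'] at hrest'p
                exact (List.pairwise_cons.1 hrest'p).1 x hmemt
              have h2 : x ≤ h0 := hx h0 (hsub.mem (by rw [hr']; simp))
              exact hh0x (le_antisymm h1 h2)
        have hlt : ∀ y ∈ rest.dropWhile (fun y => y == x), x < y := fun y hy =>
          lt_of_le_of_ne (hx y (hsub.mem hy)) (fun he => hxnot (he ▸ hy))
        have hcx : (x :: rest).count x = (rest.takeWhile (fun y => y == x)).length + 1 := by
          have h1 : (rest.takeWhile (fun y => y == x)).count x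
              = (rest.takeWhile (fun y => y == x)).length :=
            List.count_eq_length.2 (fun b hb => (hsame b hb).symm)
          have h2 : (rest.dropWhile (fun y => y == x)).count x = 0 := List.count_eq_zero.2 hxnot
          rw [List.count_cons_self]
          conv_lhs => rw [← hsplit]
          rw [List.count_append, h1, h2]
        have hcne : ∀ v, v ≠ x → (x :: rest).count v = (rest.dropWhile (fun y => y == x)).count v := by
          intro v hv
          have h1 : (rest.takeWhile (fun y => y == x)).count v = 0 :=
            List.count_eq_zero.2 (fun hm => hv (hsame v hm))
          rw [List.count_cons_of_ne (Ne.symm hv)]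
          conv_lhs => rw [← hsplit]
          rw [List.count_append, h1, Nat.zero_add]
        have hmem' : ∀ v, v ∈ rest.dropWhile (fun y => y == x) ↔ (v ∈ x :: rest ∧ v ≠ x) := by
          intro v
          constructor
          · intro h
            exact ⟨List.mem_cons_of_mem _ (hsub.mem h), fun he => hxnot (he ▸ h)⟩
          · rintro ⟨hm, hne⟩
            rcases List.mem_cons.1 hm with rfl | hm
            · exact absurd rfl hne
            · rw [← hsplit] at hm
              rcases List.mem_append.1 hm with h | h
              · exact absurd (hsame v h) hne
              · exact h
        obtain ⟨ih1, ih2, ih3, ih4, ih5, ih6⟩ := ihn (rest.dropWhile (fun y => y == x))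
            (by have := List.length_dropWhile_le (fun y => y == x) rest
                simp only [List.length_cons] at hlen; omega) hrest'p
        have hrun : pvRunScan (x :: rest) =
            (if 3 ≤ (rest.takeWhile (fun y => y == x)).length + 1 then
              ((x :: (pvRunScan (rest.dropWhile (fun y => y == x))).1,
                (pvRunScan (rest.dropWhile (fun y => y == x))).2) : List Int × List Int)
            else if (rest.takeWhile (fun y => y == x)).length + 1 = 2 then
              ((pvRunScan (rest.dropWhile (fun y => y == x))).1,
                x :: (pvRunScan (rest.dropWhile (fun y => y == x))).2)
            else pvRunScan (rest.dropWhile (fun y => y == x))) := by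
          rw [pvRunScan]
        by_cases h3 : (3 : ℕ) ≤ (rest.takeWhile (fun y => y == x)).length + 1
        · rw [hrun, if_pos h3]
          refine ⟨?_, ?_, ?_, ih4, ?_, ih6⟩
          · intro v
            constructor
            · rintro hv
              rcases List.mem_cons.1 hv with rfl | hv
              · exact ⟨by simp, by rw [hcx]; omega⟩
              · obtain ⟨hvr, hcv⟩ := (ih1 v).1 hv
                have hne : v ≠ x := ((hmem' v).1 hvr).2
                exact ⟨((hmem' v).1 hvr).1, by rw [hcne v hne]; exact hcv⟩
            · rintro ⟨hm, hc⟩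
              by_cases hvx : v = x
              · exact List.mem_cons.2 (Or.inl hvx)
              · refine List.mem_cons.2 (Or.inr ((ih1 v).2 ⟨(hmem' v).2 ⟨hm, hvx⟩, ?_⟩))
                rw [← hcne v hvx]; exact hc
          · intro v
            rw [ih2 v]
            constructor
            · rintro ⟨hvr, hcv⟩
              have hne := ((hmem' v).1 hvr).2
              exact ⟨((hmem' v).1 hvr).1, by rw [hcne v hne]; exact hcv⟩
            · rintro ⟨hm, hc⟩
              by_cases hvx : v = x
              · subst hvx; rw [hcx] at hc; omega
              · exact ⟨(hmem' v).2 ⟨hm, hvx⟩, by rw [← hcne v hvx]; exact hc⟩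
          · refine List.pairwise_cons.2 ⟨fun y hy => le_of_lt (hlt y ((ih1 y).1 hy).1), ih3⟩
          · exact List.nodup_cons.2 ⟨fun hxth => hxnot ((ih1 x).1 hxth).1, ih5⟩
        · by_cases h2 : (rest.takeWhile (fun y => y == x)).length + 1 = 2
          · rw [hrun, if_neg h3, if_pos h2]
            refine ⟨?_, ?_, ih3, ?_, ih5, ?_⟩
            · intro v
              rw [ih1 v]
              constructor
              · rintro ⟨hvr, hcv⟩
                have hne := ((hmem' v).1 hvr).2
                exact ⟨((hmem' v).1 hvr).1, by rw [hcne v hne]; exact hcv⟩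
              · rintro ⟨hm, hc⟩
                by_cases hvx : v = x
                · subst hvx; rw [hcx] at hc; omega
                · exact ⟨(hmem' v).2 ⟨hm, hvx⟩, by rw [← hcne v hvx]; exact hc⟩
            · intro v
              constructor
              · rintro hv
                rcases List.mem_cons.1 hv with rfl | hv
                · exact ⟨by simp, by rw [hcx]; omega⟩
                · obtain ⟨hvr, hcv⟩ := (ih2 v).1 hv
                  have hne : v ≠ x := ((hmem' v).1 hvr).2
                  exact ⟨((hmem' v).1 hvr).1, by rw [hcne v hne]; exact hcv⟩
              · rintro ⟨hm, hc⟩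
                by_cases hvx : v = x
                · exact List.mem_cons.2 (Or.inl hvx)
                · refine List.mem_cons.2 (Or.inr ((ih2 v).2 ⟨(hmem' v).2 ⟨hm, hvx⟩, ?_⟩))
                  rw [← hcne v hvx]; exact hc
            · refine List.pairwise_cons.2 ⟨fun y hy => le_of_lt (hlt y ((ih2 y).1 hy).1), ih4⟩
            · exact List.nodup_cons.2 ⟨fun hxtw => hxnot ((ih2 x).1 hxtw).1, ih6⟩
          · rw [hrun, if_neg h3, if_neg h2]
            refine ⟨?_, ?_, ih3, ih4, ih5, ih6⟩
            · intro v
              rw [ih1 v]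
              constructor
              · rintro ⟨hvr, hcv⟩
                have hne := ((hmem' v).1 hvr).2
                exact ⟨((hmem' v).1 hvr).1, by rw [hcne v hne]; exact hcv⟩
              · rintro ⟨hm, hc⟩
                by_cases hvx : v = x
                · subst hvx; rw [hcx] at hc; omega
                · exact ⟨(hmem' v).2 ⟨hm, hvx⟩, by rw [← hcne v hvx]; exact hc⟩
            · intro v
              rw [ih2 v]
              constructor
              · rintro ⟨hvr, hcv⟩
                have hne := ((hmem' v).1 hvr).2
                exact ⟨((hmem' v).1 hvr).1, by rw [hcne v hne]; exact hcv⟩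
              · rintro ⟨hm, hc⟩
                by_cases hvx : v = x
                · subst hvx; rw [hcx] at hc; omega
                · exact ⟨(hmem' v).2 ⟨hm, hvx⟩, by rw [← hcne v hvx]; exact hc⟩
  intro l hp
  exact key l.length l le_rfl hp

-- a dedup-append loop over fresh distinct items just appends them
theorem foldl_dedup_append :
    ∀ (m acc : List (List Int)), m.Nodup → (∀ s ∈ m, s ∉ acc) →
      m.foldl (fun a s => if s ∈ a then a else a ++ [s]) acc = acc ++ m := by
  intro m
  induction m with
  | nil => intro acc _ _; simp
  | cons s m ih =>
    intro acc hnd hfresh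
    rw [List.foldl_cons, if_neg (hfresh s (by simp))]
    rw [ih _ (List.nodup_cons.1 hnd).2 ?_]
    · simp
    · intro t ht hmem
      rcases List.mem_append.1 hmem with h | h
      · exact hfresh t (List.mem_cons_of_mem _ ht) h
      · rw [List.mem_singleton] at h
        subst h
        exact (List.nodup_cons.1 hnd).1 ht

-- A's nested product loop with its (never-firing) duplicate check is the plain product
theorem prod_loop (w : List Int) (hw : w.Nodup) :
    ∀ (t : List Int) (acc : List (List Int)), t.Nodup →
      (∀ i ∈ t, ∀ j ∈ w, [i, i, i, j, j] ∉ acc) →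
      t.foldl (fun acc i => w.foldl (fun acc2 j =>
          if [i, i, i, j, j] ∈ acc2 then acc2 else acc2 ++ [[i, i, i, j, j]]) acc) acc
        = acc ++ t.flatMap (fun i => w.map (fun j => [i, i, i, j, j])) := by
  intro t
  induction t with
  | nil => intro acc _ _; simp
  | cons i t ih =>
    intro acc ht hacc
    rw [List.foldl_cons]
    have hinj : Function.Injective (fun j : Int => [i, i, i, j, j]) := by
      intro a b h; simpa using h
    have hinner : w.foldl (fun acc2 j =>
        if [i, i, i, j, j] ∈ acc2 then acc2 else acc2 ++ [[i, i, i, j, j]]) acc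
        = acc ++ w.map (fun j => [i, i, i, j, j]) := by
      have hfm := foldl_dedup_append (w.map (fun j => [i, i, i, j, j])) acc (hw.map hinj) ?_
      · rw [List.foldl_map] at hfm
        exact hfm
      · intro s hs
        rcases List.mem_map.1 hs with ⟨j, hj, rfl⟩
        exact hacc i (by simp) j hj
    have hfresh' : ∀ i' ∈ t, ∀ j ∈ w,
        [i', i', i', j, j] ∉ acc ++ w.map (fun j => [i, i, i, j, j]) := by
      intro i' hi' j hj hmem
      rcases List.mem_append.1 hmem with h | h
      · exact hacc i' (List.mem_cons_of_mem _ hi') j hj h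
      · rcases List.mem_map.1 h with ⟨j₀, hj₀, heq⟩
        simp only [List.cons.injEq] at heq
        obtain ⟨h1, -⟩ := heq
        subst h1
        exact (List.nodup_cons.1 ht).1 hi'
    rw [hinner, ih _ (List.nodup_cons.1 ht).2 hfresh']
    simp [List.flatMap_cons, List.append_assoc]

theorem find_san_dai_er_eq (target_cards : List Int) :
    find_san_dai_er target_cards = find_san_dai_er_alt target_cards := by
  show (ddLoop (fun i => 3 ≤ PySem.List.count (PySem.List.sorted target_cards (fun x => x) false) i)
        (PySem.List.sorted target_cards (fun x => x) false) []).foldl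
      (fun acc i =>
        (ddLoop (fun i => (PySem.List.count (PySem.List.sorted target_cards (fun x => x) false) i == 2) = true)
            (PySem.List.sorted target_cards (fun x => x) false) []).foldl
          (fun acc2 j => if [i, i, i, j, j] ∈ acc2 then acc2 else acc2 ++ [[i, i, i, j, j]]) acc) []
    = (pvRunScan (PySem.List.sorted target_cards (fun x => x) false)).1.flatMap
        (fun t => (pvRunScan (PySem.List.sorted target_cards (fun x => x) false)).2.map
          (fun p => [t, t, t, p, p]))
  have hxs : (PySem.List.sorted target_cards (fun x => x) false).Pairwise (· ≤ ·) :=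
    PySem.List.sorted_pairwise target_cards (fun x => x)
  obtain ⟨m1, m2, p1, p2, n1, n2⟩ := pvRunScan_spec _ hxs
  have h3 : ddLoop (fun i => 3 ≤ PySem.List.count (PySem.List.sorted target_cards (fun x => x) false) i)
      (PySem.List.sorted target_cards (fun x => x) false) []
      = (pvRunScan (PySem.List.sorted target_cards (fun x => x) false)).1 := by
    refine PySem.List.eq_of_perm_of_pairwise_le_of_injective (fun x => x) Function.injective_id ?_ ?_ p1
    · refine (List.perm_ext_iff_of_nodup (nodup_ddLoop _ _ [] List.nodup_nil) n1).2 ?_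
      intro v
      rw [mem_ddLoop, m1 v]
      simp [PySem.List.count_eq]
    · exact pairwise_ddLoop _ _ [] hxs List.Pairwise.nil (by simp)
  have h2 : ddLoop (fun i => (PySem.List.count (PySem.List.sorted target_cards (fun x => x) false) i == 2) = true)
      (PySem.List.sorted target_cards (fun x => x) false) []
      = (pvRunScan (PySem.List.sorted target_cards (fun x => x) false)).2 := by
    refine PySem.List.eq_of_perm_of_pairwise_le_of_injective (fun x => x) Function.injective_id ?_ ?_ p2
    · refine (List.perm_ext_iff_of_nodup (nodup_ddLoop _ _ [] List.nodup_nil) n2).2 ?_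
      intro v
      rw [mem_ddLoop, m2 v]
      simp [PySem.List.count_eq]
    · exact pairwise_ddLoop _ _ [] hxs List.Pairwise.nil (by simp)
  rw [h3, h2, prod_loop _ n2 _ [] n1 (fun _ _ _ _ => by simp), List.nil_append]

-- ===== VERDICT (by name: the statement is the Claim_ definition above) =====
theorem find_san_dai_er_spec : Claim_equal_find_san_dai_er := by
  intro target_cards _
  exact find_san_dai_er_eq target_cards
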